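-- pv_equiv track=rewrite | github.com/Zaaachary/Python-Foundation-Suda | 03_本科编程题/06_2019年.py | func4_2
-- ===== SOURCE A (Python) =====
-- def func4_2(A):
--     # 实现方法2
--     m = len(A)
--     B = [[0]*m for _ in range(2*m-1)]
--     for i in range(m):
--         for j in range(m):
--             if i + j < m:
--                 B[i+j][j] = A[i][j]
--             else:
--                 B[i+j][m-i-1] = A[i][j]
--     return B
-- ===== SOURCE B (Python) =====
-- def func4_2(A):
--     # Gather: build each output row d directly from its anti-diagonal of A,
--     # instead of scattering A's cells into a preallocated matrix.
--     m = len(A)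
--     B = []
--     for d in range(2*m - 1):
--         row = [0]*m
--         if d < m:
--             for i in range(d + 1):
--                 row[d - i] = A[i][d - i]
--         else:
--             for c in range(2*m - 1 - d):
--                 row[c] = A[m - 1 - c][d - (m - 1 - c)]
--         B.append(row)
--     return B
-- ===== Notes on version B (the rewrite author's own statement) =====
-- stated objective: alternative
-- what changed: B builds each output row of the diagonal matrix directly by gathering along its anti-diagonal of A (inverting the index map), instead of A's preallocating a zero matrix and scattering every input cell into it; same O(m^2) cost, output-driven instead of input-driven.
import Mathlib
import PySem

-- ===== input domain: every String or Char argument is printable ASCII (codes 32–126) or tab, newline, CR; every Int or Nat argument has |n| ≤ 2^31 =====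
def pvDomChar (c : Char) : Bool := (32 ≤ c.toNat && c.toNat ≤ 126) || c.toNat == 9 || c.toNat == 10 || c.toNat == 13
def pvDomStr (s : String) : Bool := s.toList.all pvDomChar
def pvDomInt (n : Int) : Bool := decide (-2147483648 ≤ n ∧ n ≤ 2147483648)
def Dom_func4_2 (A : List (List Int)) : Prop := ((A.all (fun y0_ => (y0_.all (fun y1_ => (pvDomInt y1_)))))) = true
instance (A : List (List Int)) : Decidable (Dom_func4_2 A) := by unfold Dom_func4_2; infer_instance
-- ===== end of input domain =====

-- B builds each output row directly (gather along anti-diagonals) instead of A's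
-- scatter of every input cell into a preallocated matrix: an alternative decomposition.

-- ===== PORT A =====
-- A[i][j]: inside Pre_ every access is in range, so getD is exact there.
def pvVal (A : List (List Int)) (i j : Nat) : Int := (A.getD i []).getD j 0

-- B[r][c] = v (r and c are always in range in A's code)
def pvSetRC (B : List (List Int)) (r c : Nat) (v : Int) : List (List Int) :=
  B.set r ((B.getD r []).set c v)

def func4_2 (A : List (List Int)) : List (List Int) :=
  let m := A.length
  let B0 := List.replicate (2*m - 1) (List.replicate m (0:Int))
  (List.range m).foldl (fun B i =>
    (List.range m).foldl (fun B j =>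
      if i + j < m then pvSetRC B (i+j) j (pvVal A i j)
      else pvSetRC B (i+j) (m-i-1) (pvVal A i j)) B) B0

-- ===== PORT B =====
def func4_2_alt (A : List (List Int)) : List (List Int) :=
  let m := A.length
  (List.range (2*m - 1)).map (fun d =>
    if d < m then
      (List.range (d+1)).foldl (fun row i => row.set (d-i) (pvVal A i (d-i))) (List.replicate m 0)
    else
      (List.range (2*m - 1 - d)).foldl
        (fun row c => row.set c (pvVal A (m-1-c) (d-(m-1-c)))) (List.replicate m 0))

-- ===== PRECONDITION & SPEC =====
-- Python A reads A[i][j] for all i,j < len(A), so it raises IndexError exactly when some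
-- row is shorter than len(A); exactly those inputs are excluded.
def Pre_func4_2 (A : List (List Int)) : Prop := ∀ row ∈ A, A.length ≤ row.length
instance (A : List (List Int)) : Decidable (Pre_func4_2 A) := by unfold Pre_func4_2; infer_instance
def pvWitness_func4_2 : List (List Int) := [[1, 2], [3, 4]]

def Spec_func4_2 (A : List (List Int)) (out : List (List Int)) : Prop := out = func4_2_alt A
instance (A : List (List Int)) (out : List (List Int)) : Decidable (Spec_func4_2 A out) := by unfold Spec_func4_2; infer_instance

-- ===== CLAIM (what is proved, stated in full; the proofs are below) =====
def Claim_equal_func4_2 : Prop := ∀ (A : List (List Int)), Dom_func4_2 A → Pre_func4_2 A → Spec_func4_2 A (func4_2 A)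

-- ===== LEMMAS AND PROOFS =====

-- the cell of A's matrix that scatter-step i writes into output row d
def pvTgt (m d i : Nat) : Nat := if d < m then d - i else m - i - 1

-- the effect of A's scatter pass i on a single output row d
def pvRowStep (A : List (List Int)) (m d : Nat) (row : List Int) (i : Nat) : List Int :=
  if i ≤ d ∧ d < i + m then row.set (pvTgt m d i) (pvVal A i (d-i)) else row

theorem foldl_length_inv {α β : Type} (l : List β) (f : List α → β → List α)
    (hf : ∀ x k, (f x k).length = x.length) (init : List α) :
    (l.foldl f init).length = init.length := by
  induction l generalizing init with
  | nil => rfl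
  | cons b l ih => simp [List.foldl, ih, hf]

-- B's lower branch: identity-position row fold
theorem foldl_set_id (n : Nat) (w : Nat → Int) (init : List Int) (c : Nat) :
    ((List.range n).foldl (fun row k => row.set k (w k)) init)[c]? =
      if c < n ∧ c < init.length then some (w c) else init[c]? := by
  induction n with
  | zero => simp
  | succ n ih =>
    rw [List.range_succ, List.foldl_append]
    simp only [List.foldl_cons, List.foldl_nil]
    rw [List.getElem?_set,
      foldl_length_inv _ _ (fun x k => List.length_set) init, ih]
    split_ifs <;>
      first
        | rfl
        | omega
        | (exact congrArg some (congrArg w (by omega)))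
        | (exact (List.getElem?_eq_none (by omega)).symm)

-- B's upper branch: decreasing-position row fold
theorem foldl_set_sub (d n : Nat) (v : Nat → Int) (init : List Int) (c : Nat) (hn : n ≤ d+1) :
    ((List.range n).foldl (fun row i => row.set (d-i) (v i)) init)[c]? =
      if c ≤ d ∧ d - c < n ∧ c < init.length then some (v (d-c)) else init[c]? := by
  revert hn
  induction n with
  | zero => intro _; simp
  | succ n ih =>
    intro hn
    rw [List.range_succ, List.foldl_append]
    simp only [List.foldl_cons, List.foldl_nil]
    rw [List.getElem?_set,
      foldl_length_inv _ _ (fun x k => List.length_set) init, ih (by omega)]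
    split_ifs <;>
      first
        | rfl
        | omega
        | (rename_i h1 _ _; have hc : d - c = n := by omega
           rw [hc])
        | (exact (List.getElem?_eq_none (by omega)).symm)

-- A's inner loop (pass i, first n steps) touches output row d at most once
theorem inner_char (A : List (List Int)) (m i n : Nat) (hn : n ≤ m)
    (B : List (List Int)) (d : Nat) :
    ((List.range n).foldl (fun B j =>
        if i + j < m then pvSetRC B (i+j) j (pvVal A i j)
        else pvSetRC B (i+j) (m-i-1) (pvVal A i j)) B)[d]? =
      if i ≤ d ∧ d < i + n then
        Option.map (fun r => r.set (pvTgt m d i) (pvVal A i (d-i))) B[d]?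
      else B[d]? := by
  revert hn
  induction n generalizing d with
  | zero => intro _; simp
  | succ n ih =>
    intro hn
    rw [List.range_succ, List.foldl_append]
    simp only [List.foldl_cons, List.foldl_nil]
    have hlen :
        ((List.range n).foldl (fun B j =>
          if i + j < m then pvSetRC B (i+j) j (pvVal A i j)
          else pvSetRC B (i+j) (m-i-1) (pvVal A i j)) B).length = B.length :=
      foldl_length_inv _ _ (fun x k => by split <;> simp [pvSetRC]) B
    have hself : ((List.range n).foldl (fun B j =>
          if i + j < m then pvSetRC B (i+j) j (pvVal A i j)
          else pvSetRC B (i+j) (m-i-1) (pvVal A i j)) B)[i+n]? = B[i+n]? := by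
      rw [ih (i+n) (by omega)]; simp
    rw [show (if i + n < m then
        pvSetRC ((List.range n).foldl (fun B j =>
          if i + j < m then pvSetRC B (i+j) j (pvVal A i j)
          else pvSetRC B (i+j) (m-i-1) (pvVal A i j)) B) (i+n) n (pvVal A i n)
      else
        pvSetRC ((List.range n).foldl (fun B j =>
          if i + j < m then pvSetRC B (i+j) j (pvVal A i j)
          else pvSetRC B (i+j) (m-i-1) (pvVal A i j)) B) (i+n) (m-i-1) (pvVal A i n)) =
      ((List.range n).foldl (fun B j =>
          if i + j < m then pvSetRC B (i+j) j (pvVal A i j)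
          else pvSetRC B (i+j) (m-i-1) (pvVal A i j)) B).set (i+n)
        ((((List.range n).foldl (fun B j =>
          if i + j < m then pvSetRC B (i+j) j (pvVal A i j)
          else pvSetRC B (i+j) (m-i-1) (pvVal A i j)) B).getD (i+n) []).set
          (pvTgt m (i+n) i) (pvVal A i ((i+n)-i))) from by
      unfold pvSetRC pvTgt
      split <;> simp]
    rw [List.getElem?_set, List.getD_eq_getElem?_getD, hself, hlen, ih d (by omega)]
    by_cases hdn : i + n = d
    · subst hdn
      rw [if_pos rfl, if_pos (show i ≤ i+n ∧ i+n < i+(n+1) by omega)]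
      cases hB : B[i+n]? with
      | none =>
        have hle : B.length ≤ i+n := List.getElem?_eq_none_iff.mp hB
        rw [if_neg (by omega)]
        simp
      | some r =>
        have hlt : i+n < B.length := by
          by_contra hcon
          rw [List.getElem?_eq_none_iff.mpr (by omega)] at hB
          simp at hB
        rw [if_pos hlt]
        simp
    · rw [if_neg hdn]
      split_ifs <;> first | rfl | omega

-- A's outer loop, rowwise
theorem outer_char (A : List (List Int)) (m n : Nat) (hm : n ≤ m)
    (B0 : List (List Int)) (d : Nat) :
    ((List.range n).foldl (fun B i =>
        (List.range m).foldl (fun B j =>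
          if i + j < m then pvSetRC B (i+j) j (pvVal A i j)
          else pvSetRC B (i+j) (m-i-1) (pvVal A i j)) B) B0)[d]? =
      Option.map (fun r => (List.range n).foldl (pvRowStep A m d) r) B0[d]? := by
  revert hm
  induction n with
  | zero => intro _; simp
  | succ n ih =>
    intro hm
    rw [List.range_succ, List.foldl_append]
    simp only [List.foldl_cons, List.foldl_nil]
    rw [inner_char A m n m le_rfl _ d, ih (by omega)]
    simp only [List.foldl_append, List.foldl_cons, List.foldl_nil]
    cases hB : B0[d]? with
    | none => simp
    | some r =>
      simp only [Option.map_some]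
      rw [show pvRowStep A m d ((List.range n).foldl (pvRowStep A m d) r) n =
        (if n ≤ d ∧ d < n + m then
          ((List.range n).foldl (pvRowStep A m d) r).set (pvTgt m d n) (pvVal A n (d-n))
        else (List.range n).foldl (pvRowStep A m d) r) from rfl]
      split_ifs <;> rfl

-- pointwise value of a scatter row, upper diagonals
theorem rowstep_upper (A : List (List Int)) (m d : Nat) (hd : d < m)
    (n : Nat) (init : List Int) (c : Nat) :
    ((List.range n).foldl (pvRowStep A m d) init)[c]? =
      if c ≤ d ∧ d - c < n ∧ c < init.length then some (pvVal A (d-c) (d-(d-c))) else init[c]? := by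
  induction n with
  | zero => simp
  | succ n ih =>
    rw [List.range_succ, List.foldl_append]
    simp only [List.foldl_cons, List.foldl_nil]
    have hlenrow : ((List.range n).foldl (pvRowStep A m d) init).length = init.length :=
      foldl_length_inv _ _ (fun x k => by unfold pvRowStep; split <;> simp) init
    by_cases hnd : n ≤ d
    · rw [show pvRowStep A m d ((List.range n).foldl (pvRowStep A m d) init) n =
          ((List.range n).foldl (pvRowStep A m d) init).set (d-n) (pvVal A n (d-n)) from by
        unfold pvRowStep pvTgt
        rw [if_pos ⟨hnd, by omega⟩, if_pos hd]]
      rw [List.getElem?_set, hlenrow, ih]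
      split_ifs with h1 h2 h3
      · have hc : d - c = n := by omega
        rw [hc]
      · omega
      · omega
      · exact (List.getElem?_eq_none (by omega)).symm
      all_goals (first | rfl | omega)
    · rw [show pvRowStep A m d ((List.range n).foldl (pvRowStep A m d) init) n =
          (List.range n).foldl (pvRowStep A m d) init from by
        unfold pvRowStep; rw [if_neg (by omega)]]
      rw [ih]
      split_ifs <;> first | rfl | omega

-- pointwise value of a scatter row, lower diagonals
theorem rowstep_lower (A : List (List Int)) (m d : Nat) (hd : m ≤ d)
    (n : Nat) (hn : n ≤ m) (init : List Int) (c : Nat) :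
    ((List.range n).foldl (pvRowStep A m d) init)[c]? =
      if c < m ∧ m - 1 - c < n ∧ d < (m - 1 - c) + m ∧ c < init.length
      then some (pvVal A (m-1-c) (d-(m-1-c))) else init[c]? := by
  revert hn
  induction n with
  | zero => intro _; simp
  | succ n ih =>
    intro hn
    rw [List.range_succ, List.foldl_append]
    simp only [List.foldl_cons, List.foldl_nil]
    have hlenrow : ((List.range n).foldl (pvRowStep A m d) init).length = init.length :=
      foldl_length_inv _ _ (fun x k => by unfold pvRowStep; split <;> simp) init
    by_cases hact : d < n + m
    · rw [show pvRowStep A m d ((List.range n).foldl (pvRowStep A m d) init) n =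
          ((List.range n).foldl (pvRowStep A m d) init).set (m-n-1) (pvVal A n (d-n)) from by
        unfold pvRowStep pvTgt
        rw [if_pos ⟨by omega, hact⟩, if_neg (by omega)]]
      rw [List.getElem?_set, hlenrow, ih (by omega)]
      split_ifs with h1 h2 h3
      · have hc : m - 1 - c = n := by omega
        rw [hc]
      · omega
      · omega
      · exact (List.getElem?_eq_none (by omega)).symm
      all_goals (first | rfl | omega)
    · rw [show pvRowStep A m d ((List.range n).foldl (pvRowStep A m d) init) n =
          (List.range n).foldl (pvRowStep A m d) init from by
        unfold pvRowStep; rw [if_neg (by omega)]]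
      rw [ih (by omega)]
      split_ifs <;> first | rfl | omega

theorem main_eq (A : List (List Int)) : func4_2 A = func4_2_alt A := by
  apply List.ext_getElem?
  intro d
  have hA : (func4_2 A)[d]? =
      Option.map (fun r => (List.range A.length).foldl (pvRowStep A A.length d) r)
        ((List.replicate (2*A.length - 1) (List.replicate A.length (0:Int)))[d]?) :=
    outer_char A A.length A.length le_rfl _ d
  rw [hA]
  show _ = (func4_2_alt A)[d]?
  unfold func4_2_alt
  simp only [List.getElem?_map]
  by_cases hd : d < 2*A.length - 1
  · rw [List.getElem?_range hd, List.getElem?_replicate, if_pos hd]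
    simp only [Option.map_some]
    refine congrArg some ?_
    apply List.ext_getElem?
    intro c
    by_cases hdm : d < A.length
    · rw [if_pos hdm, rowstep_upper A A.length d hdm A.length _ c,
        foldl_set_sub d (d+1) _ _ c le_rfl]
      simp only [List.length_replicate]
      split_ifs <;> first | rfl | omega
    · rw [if_neg hdm, rowstep_lower A A.length d (by omega) A.length le_rfl _ c,
        foldl_set_id]
      simp only [List.length_replicate]
      split_ifs <;> first | rfl | omega
  · rw [List.getElem?_eq_none (l := List.replicate (2*A.length-1) (List.replicate A.length (0:Int))) (by simp; omega),
      List.getElem?_eq_none (l := List.range (2*A.length-1)) (by simp; omega)]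
    rfl

-- ===== VERDICT (by name: the statement is the Claim_ definition above) =====
theorem func4_2_spec : Claim_equal_func4_2 := by
  intro A _ _
  unfold Spec_func4_2
  exact main_eq A
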